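-- pv_equiv track=rewrite | github.com/GenMillennials/Python3 | Caesar_encryption.py | is_decryption_eng
-- ===== SOURCE A (Python) =====
-- def is_decryption_eng(data, rotate):
--     L = list()
--     s = str()
--     for i in data:
--         if i.isupper():
--             s = chr((((ord(i) - 65) - rotate) % 26) + 65)
--             L.append(s)
--         elif i.islower():
--             s = chr((((ord(i) - 97) - rotate) % 26) + 97)
--             L.append(s)
--         else:
--             s = i
--             L.append(s)
--     return "".join(L)   # str()
-- ===== SOURCE B (Python) =====
-- def is_decryption_eng(data, rotate):
--     up = "ABCDEFGHIJKLMNOPQRSTUVWXYZ"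
--     lo = "abcdefghijklmnopqrstuvwxyz"
--     r = rotate % 26
--     src = up + lo
--     dst = up[-r:] + up[:-r] + lo[-r:] + lo[:-r]
--     return "".join(dst[src.index(c)] if c in src else c for c in data)
-- ===== Notes on version B (the rewrite author's own statement) =====
-- stated objective: alternative
-- what changed: B rotates each alphabet string right by rotate%26 via slicing and substitutes every letter by its position in the plain alphabet, so no per-character chr/ord/modular arithmetic or case branching remains; A computes the shift arithmetically per character.
import Mathlib
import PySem

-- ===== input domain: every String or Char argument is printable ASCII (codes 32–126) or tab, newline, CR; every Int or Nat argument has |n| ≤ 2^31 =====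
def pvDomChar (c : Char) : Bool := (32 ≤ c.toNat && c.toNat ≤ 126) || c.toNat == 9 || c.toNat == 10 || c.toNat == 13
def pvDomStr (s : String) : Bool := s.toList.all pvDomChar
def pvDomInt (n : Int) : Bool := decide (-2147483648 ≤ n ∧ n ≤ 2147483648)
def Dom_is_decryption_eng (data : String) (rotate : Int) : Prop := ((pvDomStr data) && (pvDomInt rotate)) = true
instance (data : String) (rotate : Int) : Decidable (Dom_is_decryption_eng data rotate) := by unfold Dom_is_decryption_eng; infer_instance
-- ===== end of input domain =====

-- B rotates each alphabet string by rotate % 26 via slicing and substitutes letters by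
-- their position in the plain alphabet (no per-character arithmetic); same return value as A.


-- ===== PORT A =====
-- loop over data, branching on isupper/islower, appending the shifted (or unchanged) char
def is_decryption_eng (data : String) (rotate : Int) : String :=
  String.mk (data.toList.foldl (fun L i =>
    if PySem.Chars.isupper i then
      L ++ [Char.ofNat ((PySem.Int.mod (((i.toNat : Int) - 65) - rotate) 26 + 65).toNat)]
    else if PySem.Chars.islower i then
      L ++ [Char.ofNat ((PySem.Int.mod (((i.toNat : Int) - 97) - rotate) 26 + 97).toNat)]
    else
      L ++ [i]) [])

-- ===== PORT B =====
-- the two alphabet literals and src = up + lo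
def pvUp : List Char := "ABCDEFGHIJKLMNOPQRSTUVWXYZ".toList
def pvLo : List Char := "abcdefghijklmnopqrstuvwxyz".toList
def pvSrc : List Char := pvUp ++ pvLo
-- dst = up[-r:] + up[:-r] + lo[-r:] + lo[:-r]
def pvDst (r : Int) : List Char :=
  PySem.List.slice pvUp (some (-r)) none ++ PySem.List.slice pvUp none (some (-r)) ++
  PySem.List.slice pvLo (some (-r)) none ++ PySem.List.slice pvLo none (some (-r))

-- per character: dst[src.index(c)] if c in src else c  ('c in src' for a 1-char c is list
-- membership; src.index never fails under the guard, so getD/none are unreachable totality guards)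
def is_decryption_eng_alt (data : String) (rotate : Int) : String :=
  let r := PySem.Int.mod rotate 26
  let dst := pvDst r
  String.mk (data.toList.map (fun c =>
    if c ∈ pvSrc then
      match PySem.List.index? pvSrc c with
      | some k => (PySem.List.pyGet? dst ((k : Nat) : Int)).getD c
      | none => c
    else c))

-- ===== PRECONDITION & SPEC =====
def Spec_is_decryption_eng (data : String) (rotate : Int) (out : String) : Prop := out = is_decryption_eng_alt data rotate
instance (data : String) (rotate : Int) (out : String) : Decidable (Spec_is_decryption_eng data rotate out) := by unfold Spec_is_decryption_eng; infer_instance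

-- ===== CLAIM =====
def Claim_equal_is_decryption_eng : Prop := ∀ (data : String) (rotate : Int), Dom_is_decryption_eng data rotate → Spec_is_decryption_eng data rotate (is_decryption_eng data rotate)

-- ===== LEMMAS AND PROOFS =====

-- A's per-character transformation
def pvStepA (rotate : Int) (i : Char) : Char :=
  if PySem.Chars.isupper i then
    Char.ofNat ((PySem.Int.mod (((i.toNat : Int) - 65) - rotate) 26 + 65).toNat)
  else if PySem.Chars.islower i then
    Char.ofNat ((PySem.Int.mod (((i.toNat : Int) - 97) - rotate) 26 + 97).toNat)
  else i

-- B's per-character transformation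
def pvStepB (rotate : Int) (c : Char) : Char :=
  if c ∈ pvSrc then
    match PySem.List.index? pvSrc c with
    | some k => (PySem.List.pyGet? (pvDst (PySem.Int.mod rotate 26)) ((k : Nat) : Int)).getD c
    | none => c
  else c

lemma pvUp_eq : pvUp = ['A','B','C','D','E','F','G','H','I','J','K','L','M','N','O','P','Q','R','S','T','U','V','W','X','Y','Z'] := by rfl
lemma pvLo_eq : pvLo = ['a','b','c','d','e','f','g','h','i','j','k','l','m','n','o','p','q','r','s','t','u','v','w','x','y','z'] := by rfl

set_option maxRecDepth 8000 in
lemma pvMem_src (cn : Nat) (h : cn < 123) (h1 : 65 ≤ cn) (h2 : cn ≤ 90 ∨ 97 ≤ cn) :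
    Char.ofNat cn ∈ pvSrc := by
  simp only [pvSrc, pvUp_eq, pvLo_eq]
  interval_cases cn <;> first | decide | omega

set_option maxRecDepth 8000 in
lemma pvIndex_src (cn : Nat) (h : cn < 123) (h1 : 65 ≤ cn) (h2 : cn ≤ 90 ∨ 97 ≤ cn) :
    PySem.List.index? pvSrc (Char.ofNat cn) = some (if cn ≤ 90 then cn - 65 else cn - 71) := by
  simp only [pvSrc, pvUp_eq, pvLo_eq]
  interval_cases cn <;> first | decide | omega

set_option maxRecDepth 8000 in
lemma pvSrc_letters : ∀ x ∈ pvSrc, (65 ≤ x.toNat ∧ x.toNat ≤ 90) ∨ (97 ≤ x.toNat ∧ x.toNat ≤ 122) := by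
  simp only [pvSrc, pvUp_eq, pvLo_eq]
  intro x hx
  fin_cases hx <;> decide

set_option maxRecDepth 8000 in
set_option maxHeartbeats 2000000 in
lemma pvDst_get (rn : Nat) (hr : rn < 26) (k : Nat) (hk : k < 52) :
    PySem.List.pyGet? (pvDst ((rn : Nat) : Int)) ((k : Nat) : Int) =
      some (Char.ofNat (if k < 26 then (k + 26 - rn) % 26 + 65 else (k - rn) % 26 + 97)) := by
  simp only [pvDst, pvUp_eq, pvLo_eq]
  interval_cases rn <;> · interval_cases k <;> decide

lemma pvStep_eq (rotate : Int) (c : Char) : pvStepA rotate c = pvStepB rotate c := by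
  have hmod : PySem.Int.mod rotate 26 = rotate % 26 := PySem.Int.mod_eq_emod_of_pos (by norm_num)
  have hr0 : 0 ≤ rotate % 26 := Int.emod_nonneg _ (by norm_num)
  have hrlt : rotate % 26 < 26 := Int.emod_lt_of_pos _ (by norm_num)
  set rn : Nat := (rotate % 26).toNat with hrn
  have hrcast : rotate % 26 = (rn : Int) := by omega
  have hc : Char.ofNat c.toNat = c := Char.ofNat_toNat c
  by_cases hu : PySem.Chars.isupper c = true
  · have hb : 65 ≤ c.toNat ∧ c.toNat ≤ 90 := by
      simp [PySem.Chars.isupper, Char.le_def, UInt32.le_iff_toNat_le] at hu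
      exact hu
    have hmem : c ∈ pvSrc := hc ▸ pvMem_src c.toNat (by omega) (by omega) (by omega)
    have hidx : PySem.List.index? pvSrc c = some (c.toNat - 65) := by
      have := pvIndex_src c.toNat (by omega) (by omega) (by omega)
      rw [hc] at this; rw [this, if_pos (by omega)]
    have hget := pvDst_get rn (by omega) (c.toNat - 65) (by omega)
    rw [if_pos (by omega)] at hget
    unfold pvStepA pvStepB
    rw [if_pos hu, if_pos hmem, hidx, hmod, hrcast]
    show Char.ofNat ((PySem.Int.mod ((c.toNat : Int) - 65 - rotate) 26 + 65).toNat) =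
      (PySem.List.pyGet? (pvDst ((rn : Nat) : Int)) (((c.toNat - 65 : Nat) : Nat) : Int)).getD c
    rw [hget, Option.getD_some]
    congr 1
    rw [PySem.Int.mod_eq_emod_of_pos (by norm_num)]
    omega
  · by_cases hl : PySem.Chars.islower c = true
    · have hb : 97 ≤ c.toNat ∧ c.toNat ≤ 122 := by
        simp [PySem.Chars.islower, Char.le_def, UInt32.le_iff_toNat_le] at hl
        exact hl
      have hmem : c ∈ pvSrc := hc ▸ pvMem_src c.toNat (by omega) (by omega) (by omega)
      have hidx : PySem.List.index? pvSrc c = some (c.toNat - 71) := by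
        have := pvIndex_src c.toNat (by omega) (by omega) (by omega)
        rw [hc] at this; rw [this, if_neg (by omega)]
      have hget := pvDst_get rn (by omega) (c.toNat - 71) (by omega)
      rw [if_neg (by omega)] at hget
      unfold pvStepA pvStepB
      rw [if_neg hu, if_pos hl, if_pos hmem, hidx, hmod, hrcast]
      show Char.ofNat ((PySem.Int.mod ((c.toNat : Int) - 97 - rotate) 26 + 97).toNat) =
        (PySem.List.pyGet? (pvDst ((rn : Nat) : Int)) (((c.toNat - 71 : Nat) : Nat) : Int)).getD c
      rw [hget, Option.getD_some]
      congr 1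
      rw [PySem.Int.mod_eq_emod_of_pos (by norm_num)]
      omega
    · have hnu : ¬ (65 ≤ c.toNat ∧ c.toNat ≤ 90) := by
        intro h
        apply hu
        simp [PySem.Chars.isupper, Char.le_def, UInt32.le_iff_toNat_le]
        exact h
      have hnl : ¬ (97 ≤ c.toNat ∧ c.toNat ≤ 122) := by
        intro h
        apply hl
        simp [PySem.Chars.islower, Char.le_def, UInt32.le_iff_toNat_le]
        exact h
      have hnm : c ∉ pvSrc := fun hm => by
        rcases pvSrc_letters c hm with h | h
        · exact hnu h
        · exact hnl h
      unfold pvStepA pvStepB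
      rw [if_neg hu, if_neg hl, if_neg hnm]

-- A's append-one-per-iteration loop produces exactly the mapped list
lemma pvFoldl_eq_map (rotate : Int) (l acc : List Char) :
    l.foldl (fun L i =>
      if PySem.Chars.isupper i then
        L ++ [Char.ofNat ((PySem.Int.mod (((i.toNat : Int) - 65) - rotate) 26 + 65).toNat)]
      else if PySem.Chars.islower i then
        L ++ [Char.ofNat ((PySem.Int.mod (((i.toNat : Int) - 97) - rotate) 26 + 97).toNat)]
      else
        L ++ [i]) acc = acc ++ l.map (pvStepA rotate) := by
  induction l generalizing acc with
  | nil => simp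
  | cons i l ih =>
    have hstep : (if PySem.Chars.isupper i then
        acc ++ [Char.ofNat ((PySem.Int.mod (((i.toNat : Int) - 65) - rotate) 26 + 65).toNat)]
      else if PySem.Chars.islower i then
        acc ++ [Char.ofNat ((PySem.Int.mod (((i.toNat : Int) - 97) - rotate) 26 + 97).toNat)]
      else
        acc ++ [i]) = acc ++ [pvStepA rotate i] := by
      unfold pvStepA; split_ifs <;> rfl
    simp only [List.foldl_cons, List.map_cons, hstep, ih, List.append_assoc, List.singleton_append]

-- ===== VERDICT =====
theorem is_decryption_eng_spec : Claim_equal_is_decryption_eng := by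
  intro data rotate _
  unfold Spec_is_decryption_eng is_decryption_eng is_decryption_eng_alt
  rw [pvFoldl_eq_map, List.nil_append]
  congr 1
  apply List.map_congr_left
  intro c _
  exact pvStep_eq rotate c
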